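-- pv_equiv track=rewrite | github.com/redbrickhut/StringSectionRosteringUtility | roster.py | __repr_section_cluster
-- ===== SOURCE A (Python) =====
-- def __repr_section_cluster(sections):
--
--     max_rows = 0
--
--     cluster = ""
--
--     for index, section in enumerate(sections):
--         section = str(section)
--         section = section.split(sep="\n")
--         sections[index] = section
--         if len(section) > max_rows:
--             max_rows = len(section)
--
--     for i in range(0, max_rows):
--         for section in sections:
--             if i >= len(section):
--                 name_str = ""
--             else:
--                 name_str = section[i]
--
--             cluster += "{0:30}".format(name_str)
--         cluster += "\n"
--
--     return cluster
-- ===== SOURCE B (Python) =====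
-- def __repr_section_cluster(sections):
--     # Phase 1 (same observable mutation as the original): stringify and split each section in place.
--     for i, s in enumerate(sections):
--         sections[i] = str(s).split(sep="\n")
--
--     # Phase 2: transpose by repeatedly peeling the first remaining line of every
--     # column until all columns are exhausted -- no max_rows, no index arithmetic.
--     cols = [list(s) for s in sections]
--     rows = []
--     while any(cols):
--         row = [(c.pop(0) if c else "") for c in cols]
--         rows.append("".join("{0:30}".format(x) for x in row) + "\n")
--     return "".join(rows)
-- ===== Notes on version B (the rewrite author's own statement) =====
-- stated objective: alternative
-- what changed: Replaces A's max_rows bookkeeping and index-based nested loop (range(max_rows) with i>=len(section) bounds checks) by a head-peeling transpose: pop the first remaining line of every column until all columns are exhausted, emitting one formatted row per iteration.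
import Mathlib
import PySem

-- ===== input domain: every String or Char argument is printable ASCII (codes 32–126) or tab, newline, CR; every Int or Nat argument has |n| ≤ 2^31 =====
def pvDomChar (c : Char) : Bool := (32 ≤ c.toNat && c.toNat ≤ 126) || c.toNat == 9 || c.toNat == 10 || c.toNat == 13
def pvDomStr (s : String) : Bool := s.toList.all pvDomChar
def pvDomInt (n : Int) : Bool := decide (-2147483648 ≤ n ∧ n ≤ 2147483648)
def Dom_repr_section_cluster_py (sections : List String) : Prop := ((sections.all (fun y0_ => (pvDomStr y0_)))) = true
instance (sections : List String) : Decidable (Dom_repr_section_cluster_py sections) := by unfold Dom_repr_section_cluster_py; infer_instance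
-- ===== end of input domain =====

-- ===== PORT A =====
-- One honest line: B replaces A's max_rows/index nested loop by a head-peeling transpose
-- (pop the first remaining line of every column until all are exhausted); objective: alternative,
-- same cost. Both A and B mutate `sections` in place in phase 1 identically; the theorem is about
-- the return value.

-- shared literal port of Python's s.split(sep="\n") (sep nonempty, never raises) — used verbatim by both ports
def pvSplitNL (s : String) : List String :=
  (PySem.Chars.splitOn s.toList ['\n']).map (fun cs => String.ofList cs)

-- shared literal port of "{0:30}".format(s): left-align, pad with spaces to width 30
def pvFmt30 (s : String) : String :=
  String.ofList (s.toList ++ List.replicate (30 - s.toList.length) ' ')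

def repr_section_cluster_py (sections : List String) : String :=
  -- first loop: stringify+split each section (str() is the identity on str), track max_rows
  let st := (PySem.List.enumerate sections 0).foldl
    (fun (acc : List (List String) × Int) p =>
      let sec := pvSplitNL p.2
      (acc.1 ++ [sec], if (sec.length : Int) > acc.2 then (sec.length : Int) else acc.2))
    ([], 0)
  -- second loop: for i in range(0, max_rows): for section in sections: …
  (PySem.List.pyRange 0 st.2 1).foldl
    (fun cluster i =>
      (st.1.foldl
        (fun c sec =>
          c ++ pvFmt30 (if i ≥ (sec.length : Int) then "" else PySem.List.pyGetD sec i ""))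
        cluster) ++ "\n")
    ""

-- ===== PORT B =====
-- row = [(c.pop(0) if c else "") for c in cols]  plus the leftover columns
def pvPeelRow (cols : List (List String)) : List String × List (List String) :=
  cols.foldr
    (fun c acc =>
      match c with
      | [] => ("" :: acc.1, ([] : List String) :: acc.2)
      | x :: xs => (x :: acc.1, xs :: acc.2))
    ([], [])

def pvTotalLen (cols : List (List String)) : Nat := (cols.map List.length).sum

theorem pvPeelRow_totalLen_le (cols : List (List String)) :
    pvTotalLen (pvPeelRow cols).2 ≤ pvTotalLen cols := by
  induction cols with
  | nil => simp [pvPeelRow, pvTotalLen]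
  | cons c cs ih =>
    cases c <;> simp [pvPeelRow, pvTotalLen] at ih ⊢ <;> omega

theorem pvPeelRow_totalLen_lt (cols : List (List String))
    (h : cols.any (fun c => !c.isEmpty) = true) :
    pvTotalLen (pvPeelRow cols).2 < pvTotalLen cols := by
  induction cols with
  | nil => simp at h
  | cons c cs ih =>
    cases c with
    | nil =>
      simp only [List.any_cons, List.isEmpty_nil, Bool.not_true, Bool.false_or] at h
      have := ih h
      simpa [pvPeelRow, pvTotalLen] using this
    | cons x xs =>
      have := pvPeelRow_totalLen_le cs
      simp [pvPeelRow, pvTotalLen] at this ⊢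
      omega

-- while any(cols): emit one formatted row, keep the tails
def pvRows (cols : List (List String)) : List String :=
  if cols.any (fun c => !c.isEmpty) = true then
    (String.join ((pvPeelRow cols).1.map pvFmt30) ++ "\n") :: pvRows (pvPeelRow cols).2
  else []
termination_by pvTotalLen cols
decreasing_by exact pvPeelRow_totalLen_lt cols (by assumption)

def repr_section_cluster_py_alt (sections : List String) : String :=
  let cols := sections.map (fun s => pvSplitNL s)
  String.join (pvRows cols)

-- ===== PRECONDITION & SPEC =====
def Spec_repr_section_cluster_py (sections : List String) (out : String) : Prop := out = repr_section_cluster_py_alt sections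
instance (sections : List String) (out : String) : Decidable (Spec_repr_section_cluster_py sections out) := by unfold Spec_repr_section_cluster_py; infer_instance

-- ===== CLAIM (what is proved, stated in full; the proofs are below) =====
def Claim_equal_repr_section_cluster_py : Prop := ∀ (sections : List String), Dom_repr_section_cluster_py sections → Spec_repr_section_cluster_py sections (repr_section_cluster_py sections)

-- ===== LEMMAS AND PROOFS =====

-- max_rows as a Nat over the split sections
def pvMaxLen (cols : List (List String)) : Nat :=
  cols.foldr (fun c m => max c.length m) 0


theorem pvMaxLen_cons (c : List String) (cs : List (List String)) :
    pvMaxLen (c :: cs) = max c.length (pvMaxLen cs) := rfl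

-- the canonical row string for row index i
def pvRowStr (cols : List (List String)) (i : Nat) : String :=
  String.join (cols.map (fun c => pvFmt30 (c.getD i ""))) ++ "\n"

-- fold of string appends is a join
theorem pvFoldlAppendId (l : List String) (init : String) :
    l.foldl (fun c x => c ++ x) init = init ++ String.join l := by
  induction l generalizing init with
  | nil => simp [String.join]
  | cons x xs ih =>
    show xs.foldl _ (init ++ x) = _
    rw [ih]
    have h2 : String.join (x :: xs) = x ++ String.join xs := by
      show xs.foldl _ ("" ++ x) = _
      rw [String.empty_append, ih]
    rw [h2, String.append_assoc]

theorem pvJoinCons (a : String) (l : List String) :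
    String.join (a :: l) = a ++ String.join l := by
  show l.foldl _ ("" ++ a) = _
  rw [String.empty_append, pvFoldlAppendId]

theorem pvFoldlAppend {α : Type} (l : List α) (f : α → String) (init : String) :
    l.foldl (fun c x => c ++ f x) init = init ++ String.join (l.map f) := by
  induction l generalizing init with
  | nil => simp [String.join]
  | cons x xs ih =>
    rw [List.foldl_cons, ih, List.map_cons, pvJoinCons, String.append_assoc]

-- peelRow is (heads, tails)
theorem pvPeelRow_eq (cols : List (List String)) :
    pvPeelRow cols = (cols.map (fun c => c.getD 0 ""), cols.map List.tail) := by
  induction cols with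
  | nil => rfl
  | cons c cs ih =>
    have h1 := congrArg Prod.fst ih
    have h2 := congrArg Prod.snd ih
    cases c <;> simp [pvPeelRow] at h1 h2 ⊢ <;> exact ⟨h1, h2⟩

theorem pvMaxLen_tail (cols : List (List String)) :
    pvMaxLen (cols.map List.tail) = pvMaxLen cols - 1 := by
  induction cols with
  | nil => rfl
  | cons c cs ih =>
    rw [List.map_cons, pvMaxLen_cons, pvMaxLen_cons, ih]
    cases c <;> simp <;> omega

theorem pvMaxLen_zero (cols : List (List String))
    (h : ¬ cols.any (fun c => !c.isEmpty) = true) :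
    pvMaxLen cols = 0 := by
  induction cols with
  | nil => rfl
  | cons c cs ih =>
    have h' : ∀ x ∈ c :: cs, x = [] := by simpa using h
    rw [pvMaxLen_cons, h' c List.mem_cons_self]
    have : pvMaxLen cs = 0 :=
      ih (by simpa using fun x hx => h' x (List.mem_cons_of_mem _ hx))
    simp [this]

theorem pvMaxLen_pos (cols : List (List String))
    (h : cols.any (fun c => !c.isEmpty) = true) :
    1 ≤ pvMaxLen cols := by
  induction cols with
  | nil => simp at h
  | cons c cs ih =>
    rw [pvMaxLen_cons]
    rcases (by simpa using h : ¬ c = [] ∨ ∃ x ∈ cs, ¬ x = []) with h1 | h2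
    · cases c with
      | nil => exact absurd rfl h1
      | cons x xs => exact le_trans (by simp) (le_max_left _ _)
    · have := ih (by simpa using h2); omega

theorem pvGetD_tail (c : List String) (i : Nat) :
    c.tail.getD i "" = c.getD (i + 1) "" := by
  cases c <;> rfl

theorem pvRowStr_tail (cols : List (List String)) (i : Nat) :
    pvRowStr (cols.map List.tail) i = pvRowStr cols (i + 1) := by
  unfold pvRowStr
  rw [List.map_map]
  congr 1
  refine congrArg String.join (List.map_congr_left ?_)
  intro c _
  rw [Function.comp_apply, pvGetD_tail]

-- pvRows is the range-indexed row list
theorem pvRows_eq (cols : List (List String)) :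
    pvRows cols = (List.range (pvMaxLen cols)).map (pvRowStr cols) := by
  induction cols using pvRows.induct with
  | case2 cols h =>
    rw [pvRows, if_neg h, pvMaxLen_zero cols h, List.range_zero, List.map_nil]
  | case1 cols h ih =>
    rw [pvRows, if_pos h]
    have hn : pvMaxLen cols = (pvMaxLen cols - 1) + 1 := by
      have := pvMaxLen_pos cols h; omega
    rw [hn, List.range_succ_eq_map, List.map_cons]
    refine congrArg₂ List.cons ?_ ?_
    · rw [pvPeelRow_eq]
      unfold pvRowStr
      rw [List.map_map]
      rfl
    · rw [ih, pvPeelRow_eq, pvMaxLen_tail, List.map_map]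
      refine List.map_congr_left ?_
      intro i _
      rw [Function.comp_apply, pvRowStr_tail]

-- A's first loop
theorem pvLoopA (xs : List String) (i : Int) (accL : List (List String)) (accM : Int) :
    (PySem.List.enumerate xs i).foldl
      (fun (acc : List (List String) × Int) p =>
        let sec := pvSplitNL p.2
        (acc.1 ++ [sec], if (sec.length : Int) > acc.2 then (sec.length : Int) else acc.2))
      (accL, accM)
    = (accL ++ xs.map (fun s => pvSplitNL s),
       xs.foldl (fun m s => max m ((pvSplitNL s).length : Int)) accM) := by
  induction xs generalizing i accL accM with
  | nil => simp [PySem.List.enumerate]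
  | cons x xs ih =>
    rw [PySem.List.enumerate_cons]
    simp only [List.foldl_cons]
    rw [ih, List.map_cons]
    refine Prod.ext ?_ ?_
    · simp
    · simp only
      congr 1
      omega

theorem pvFoldlMaxCast (xs : List String) (m : Nat) :
    xs.foldl (fun acc s => max acc ((pvSplitNL s).length : Int)) (m : Int)
      = ((xs.foldl (fun acc s => max acc (pvSplitNL s).length) m : Nat) : Int) := by
  induction xs generalizing m with
  | nil => rfl
  | cons x xs ih => simp only [List.foldl_cons]; rw [← Nat.cast_max, ih]

theorem pvFoldlMax_eq_maxLen (xs : List String) (m : Nat) :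
    xs.foldl (fun acc s => max acc (pvSplitNL s).length) m
      = max m (pvMaxLen (xs.map (fun s => pvSplitNL s))) := by
  induction xs generalizing m with
  | nil => simp [pvMaxLen]
  | cons x xs ih => simp only [List.foldl_cons, List.map_cons]; rw [ih, pvMaxLen_cons]; omega

-- ===== VERDICT (by name: the statement is the Claim_ definition above) =====
theorem pvFoldlMax0 (xs : List String) :
    xs.foldl (fun acc s => max acc ((pvSplitNL s).length : Int)) 0
      = ((pvMaxLen (xs.map (fun s => pvSplitNL s)) : Nat) : Int) := by
  have h := pvFoldlMaxCast xs 0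
  rw [Nat.cast_zero] at h
  rw [h, pvFoldlMax_eq_maxLen]
  simp

theorem pvRowPoint (secs : List (List String)) (cluster : String) (k : Nat) :
    (secs.foldl
      (fun c sec =>
        c ++ pvFmt30 (if ((k : Int)) ≥ (sec.length : Int) then "" else PySem.List.pyGetD sec (k : Int) ""))
      cluster) ++ "\n"
      = cluster ++ pvRowStr secs k := by
  rw [pvFoldlAppend, String.append_assoc]
  unfold pvRowStr
  have hmap : secs.map
        (fun sec => pvFmt30 (if ((k : Int)) ≥ (sec.length : Int) then "" else PySem.List.pyGetD sec (k : Int) ""))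
      = secs.map (fun c => pvFmt30 (c.getD k "")) := by
    refine List.map_congr_left ?_
    intro sec _
    congr 1
    by_cases hk : sec.length ≤ k
    · rw [if_pos (by exact_mod_cast hk), List.getD_eq_default]
      exact hk
    · rw [if_neg (by simpa using hk), PySem.List.pyGetD_natCast]
  rw [hmap]

-- ===== VERDICT (by name: the statement is the Claim_ definition above) =====
theorem repr_section_cluster_py_spec : Claim_equal_repr_section_cluster_py := by
  intro sections _
  unfold Spec_repr_section_cluster_py
  simp only [repr_section_cluster_py, repr_section_cluster_py_alt]
  rw [pvLoopA, List.nil_append]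
  simp only
  rw [pvFoldlMax0, PySem.List.pyRange_zero_nat, List.foldl_map]
  simp only [pvRowPoint]
  rw [pvFoldlAppend, String.empty_append, pvRows_eq]
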